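-- pv_equiv track=rewrite | github.com/JanBellingrath/inference-time-program-selection-for-transformer-models | routers/shared_router_data.py | effective_prev_action_vocab_idx
-- ===== SOURCE A (Python) =====
-- from typing import Any, Dict, List, Optional, Sequence, Set, Tuple
--
-- SKIP_SENTINEL = -1
--
-- def effective_prev_action_vocab_idx(
--     prefix_actions: Tuple[int, ...],
--     vocab_values: Sequence[int],
-- ) -> int:
--     """Vocab index of the last *non-skip* action in the prefix.
--
--     ``prefix_actions`` holds vocabulary indices. Skip is the action whose
--     underlying value is ``SKIP_SENTINEL`` (-1). Using only ``prefix_actions[-1]``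
--     would treat a trailing skip as the previous token; routing should instead
--     condition on the last executed layer (last non-skip). Empty prefix, or a
--     prefix of only skips, returns ``-1`` for the embedding sentinel.
--     """
--     if not prefix_actions:
--         return -1
--     for j in range(len(prefix_actions) - 1, -1, -1):
--         vi = prefix_actions[j]
--         if vi < 0 or vi >= len(vocab_values):
--             continue
--         if vocab_values[vi] != SKIP_SENTINEL:
--             return vi
--     return -1
-- ===== SOURCE B (Python) =====
-- SKIP_SENTINEL = -1
--
-- def effective_prev_action_vocab_idx(prefix_actions, vocab_values):
--     """Forward single pass: keep overwriting with every valid non-skip index."""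
--     result = -1
--     n = len(vocab_values)
--     for vi in prefix_actions:
--         if 0 <= vi < n and vocab_values[vi] != SKIP_SENTINEL:
--             result = vi
--     return result
-- ===== Notes on version B (the rewrite author's own statement) =====
-- stated objective: alternative
-- what changed: Replaced A's backward index loop with early return (plus an explicit empty-prefix guard) by a single forward pass over the values that overwrites an accumulator on every valid non-skip index and needs no guard or early exit.
import Mathlib
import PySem

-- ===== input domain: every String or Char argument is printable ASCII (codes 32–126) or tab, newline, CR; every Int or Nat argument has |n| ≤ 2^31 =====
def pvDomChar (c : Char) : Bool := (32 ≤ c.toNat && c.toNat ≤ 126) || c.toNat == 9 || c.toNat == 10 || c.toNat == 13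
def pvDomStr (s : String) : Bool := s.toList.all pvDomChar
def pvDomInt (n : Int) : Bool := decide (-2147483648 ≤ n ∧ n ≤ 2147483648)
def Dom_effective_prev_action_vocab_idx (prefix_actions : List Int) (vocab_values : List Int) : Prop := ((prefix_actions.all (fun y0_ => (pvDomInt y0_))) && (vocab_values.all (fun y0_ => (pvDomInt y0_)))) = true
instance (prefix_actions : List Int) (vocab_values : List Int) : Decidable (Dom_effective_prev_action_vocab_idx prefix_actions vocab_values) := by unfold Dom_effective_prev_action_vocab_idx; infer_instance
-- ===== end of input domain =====

-- B replaces A's backward early-return scan by a forward accumulator pass (different decomposition; same cost).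

-- ===== PORT A =====
-- A's backward loop 'for j in range(len-1, -1, -1)' as recursion over that index list.
def pvAGo (prefix_actions : List Int) (vocab_values : List Int) : List Int → Int
  | [] => -1
  | j :: js =>
    let vi := (PySem.List.pyGet? prefix_actions j).getD 0   -- j is always in range here
    if vi < 0 ∨ (vocab_values.length : Int) ≤ vi then pvAGo prefix_actions vocab_values js
    else if (PySem.List.pyGet? vocab_values vi).getD 0 ≠ -1 then vi
    else pvAGo prefix_actions vocab_values js

def effective_prev_action_vocab_idx (prefix_actions : List Int) (vocab_values : List Int) : Int :=
  if prefix_actions = [] then -1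
  else pvAGo prefix_actions vocab_values (PySem.List.pyRange ((prefix_actions.length : Int) - 1) (-1) (-1))

-- ===== PORT B =====
def effective_prev_action_vocab_idx_alt (prefix_actions : List Int) (vocab_values : List Int) : Int :=
  prefix_actions.foldl
    (fun result vi =>
      if 0 ≤ vi ∧ vi < (vocab_values.length : Int) ∧ (PySem.List.pyGet? vocab_values vi).getD 0 ≠ -1
      then vi else result)
    (-1)

-- ===== PRECONDITION & SPEC =====
def Spec_effective_prev_action_vocab_idx (prefix_actions : List Int) (vocab_values : List Int) (out : Int) : Prop := out = effective_prev_action_vocab_idx_alt prefix_actions vocab_values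
instance (prefix_actions : List Int) (vocab_values : List Int) (out : Int) : Decidable (Spec_effective_prev_action_vocab_idx prefix_actions vocab_values out) := by unfold Spec_effective_prev_action_vocab_idx; infer_instance

-- ===== CLAIM (what is proved, stated in full; the proofs are below) =====
def Claim_equal_effective_prev_action_vocab_idx : Prop := ∀ (prefix_actions : List Int) (vocab_values : List Int), Dom_effective_prev_action_vocab_idx prefix_actions vocab_values → Spec_effective_prev_action_vocab_idx prefix_actions vocab_values (effective_prev_action_vocab_idx prefix_actions vocab_values)

-- ===== LEMMAS AND PROOFS =====

-- the shared "valid non-skip index" test, as a Bool predicate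
def pvP (vocab_values : List Int) (vi : Int) : Bool :=
  decide (0 ≤ vi ∧ vi < (vocab_values.length : Int) ∧ (PySem.List.pyGet? vocab_values vi).getD 0 ≠ -1)

-- A's scan is "first value satisfying pvP, else -1" over the scanned values
lemma pvAGo_eq_find (pa vv : List Int) (js : List Int) :
    pvAGo pa vv js = ((js.map (fun j => (PySem.List.pyGet? pa j).getD 0)).find? (pvP vv)).getD (-1) := by
  induction js with
  | nil => rfl
  | cons j js ih =>
    simp only [pvAGo, List.map_cons, List.find?_cons]
    set vi := (PySem.List.pyGet? pa j).getD 0 with hvi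
    by_cases h1 : vi < 0 ∨ (vv.length : Int) ≤ vi
    · have hp : pvP vv vi = false := by
        simp only [pvP, decide_eq_false_iff_not]
        rintro ⟨ha, hb, -⟩
        rcases h1 with h | h <;> omega
      rw [if_pos h1, hp, ih]
    · by_cases h2 : (PySem.List.pyGet? vv vi).getD 0 ≠ -1
      · have hp : pvP vv vi = true := by
          simp only [pvP, decide_eq_true_eq]
          push Not at h1
          exact ⟨h1.1, h1.2, h2⟩
        rw [if_neg h1, if_pos h2, hp]
        rfl
      · have hp : pvP vv vi = false := by
          simp only [pvP, decide_eq_false_iff_not]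
          rintro ⟨-, -, hc⟩
          exact h2 hc
        rw [if_neg h1, if_neg h2, hp, ih]

-- B's forward overwrite fold is "first value satisfying pvP in the reversed list, else init"
lemma pvFoldl_eq_find_reverse (vv : List Int) (l : List Int) (init : Int) :
    l.foldl (fun result vi =>
        if 0 ≤ vi ∧ vi < (vv.length : Int) ∧ (PySem.List.pyGet? vv vi).getD 0 ≠ -1
        then vi else result) init
      = (l.reverse.find? (pvP vv)).getD init := by
  induction l generalizing init with
  | nil => rfl
  | cons x t ih =>
    simp only [List.foldl_cons, List.reverse_cons, List.find?_append, ih]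
    cases hf : t.reverse.find? (pvP vv) with
    | some y => simp
    | none =>
      by_cases h : 0 ≤ x ∧ x < (vv.length : Int) ∧ (PySem.List.pyGet? vv x).getD 0 ≠ -1
      · have hp : pvP vv x = true := by simpa [pvP] using h
        rw [if_pos h]
        simp [List.find?, hp]
      · have hp : pvP vv x = false := by simpa [pvP] using h
        rw [if_neg h]
        simp [List.find?, hp]

-- A's backward index walk visits exactly the values of the list, reversed
lemma pvRange_map_reverse (pa : List Int) :
    (PySem.List.pyRange ((pa.length : Int) - 1) (-1) (-1)).map
        (fun j => (PySem.List.pyGet? pa j).getD 0) = pa.reverse := by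
  have h : PySem.List.pyRange ((pa.length : Int) - 1) (-1) (-1)
      = (PySem.List.pyRange 0 (pa.length : Int) 1).reverse := by
    rw [PySem.List.pyRange_neg_one_eq_reverse]
    norm_num
  rw [h, List.map_reverse]
  exact congrArg List.reverse (PySem.List.map_pyGetD_pyRange_zero' pa 0)

-- ===== VERDICT (by name: the statement is the Claim_ definition above) =====
theorem effective_prev_action_vocab_idx_spec : Claim_equal_effective_prev_action_vocab_idx := by
  intro pa vv _
  show effective_prev_action_vocab_idx pa vv = effective_prev_action_vocab_idx_alt pa vv
  rw [effective_prev_action_vocab_idx_alt, pvFoldl_eq_find_reverse]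
  unfold effective_prev_action_vocab_idx
  by_cases hpa : pa = []
  · subst hpa; rfl
  · rw [if_neg hpa, pvAGo_eq_find, pvRange_map_reverse]
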